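-- pv_equiv track=rewrite | github.com/ap1438/annotation2bankit | lib/fasta_utils.py | extract_cds_from_genome
-- ===== SOURCE A (Python) =====
-- RC_TABLE = str.maketrans('ACGTacgt', 'TGCAtgca')
--
-- def reverse_complement(seq: str) -> str:
--     """Return the reverse complement of a DNA sequence."""
--     return seq.translate(RC_TABLE)[::-1]
--
-- def extract_cds_from_genome(
--     genomic_seq: str,
--     intervals: list,   # list of (start, stop) tuples, 1-based, start<=stop
--     strand: str,
-- ) -> str:
--     """
--     Extract and splice a CDS from a genomic sequence.
--
--     Parameters
--     ----------
--     genomic_seq : str  Full genomic sequence (0-indexed internally).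
--     intervals   : list List of (start, stop) tuples, 1-based coordinates,
--                        start <= stop regardless of strand.
--     strand      : str  '+' or '-'.
--
--     Returns
--     -------
--     str : Spliced CDS in 5'→3' coding-strand orientation (uppercase).
--
--     Notes
--     -----
--     Intervals should be sorted in ascending genomic order before calling.
--     This function will sort them ascending and then reverse-complement the
--     entire spliced sequence for minus-strand genes.
--     """
--     sorted_ivs = sorted(intervals, key=lambda x: x[0])
--     spliced = []
--     for start, stop in sorted_ivs:
--         # Convert to 0-based Python slice
--         spliced.append(genomic_seq[start - 1: stop].upper())
--     cds = ''.join(spliced)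
--     if strand == '-':
--         cds = reverse_complement(cds)
--     return cds
-- ===== SOURCE B (Python) =====
-- RC_TABLE = str.maketrans('ACGTacgt', 'TGCAtgca')
--
-- def reverse_complement(seq: str) -> str:
--     return seq.translate(RC_TABLE)[::-1]
--
-- def extract_cds_from_genome(genomic_seq, intervals, strand):
--     sorted_ivs = sorted(intervals, key=lambda x: x[0])
--     if strand == '-':
--         # fold the global reverse-complement into the traversal:
--         # walk the intervals in descending genomic order and RC each piece
--         pieces = [reverse_complement(genomic_seq[start - 1: stop].upper())
--                   for start, stop in reversed(sorted_ivs)]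
--     else:
--         pieces = [genomic_seq[start - 1: stop].upper()
--                   for start, stop in sorted_ivs]
--     return ''.join(pieces)
-- ===== Notes on version B (the rewrite author's own statement) =====
-- stated objective: alternative
-- what changed: Instead of concatenating ascending uppercased slices and reverse-complementing the whole spliced string afterwards, B distributes the reverse-complement into the traversal: on the minus strand it walks the sorted intervals in descending order and reverse-complements each piece before joining.
import Mathlib
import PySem

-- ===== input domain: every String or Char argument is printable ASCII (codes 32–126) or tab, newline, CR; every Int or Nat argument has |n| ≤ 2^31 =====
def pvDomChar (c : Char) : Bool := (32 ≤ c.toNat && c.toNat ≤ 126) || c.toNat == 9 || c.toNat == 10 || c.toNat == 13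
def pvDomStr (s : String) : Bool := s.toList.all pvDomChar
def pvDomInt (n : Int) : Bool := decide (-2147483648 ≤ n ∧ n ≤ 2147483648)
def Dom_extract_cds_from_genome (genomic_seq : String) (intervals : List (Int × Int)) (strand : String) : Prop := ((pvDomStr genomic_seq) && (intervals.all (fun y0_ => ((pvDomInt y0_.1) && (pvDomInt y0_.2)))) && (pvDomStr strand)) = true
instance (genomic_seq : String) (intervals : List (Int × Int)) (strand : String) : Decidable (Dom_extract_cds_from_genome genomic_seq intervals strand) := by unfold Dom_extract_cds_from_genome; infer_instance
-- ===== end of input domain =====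

-- B is an alternative decomposition of the same splice: on the minus strand it walks the
-- sorted intervals in descending order and reverse-complements each piece, instead of
-- reverse-complementing the whole joined CDS at the end.

-- ===== PORT A =====

-- seq.translate(RC_TABLE): per-character map, characters outside the table unchanged (exact)
def rcChar (c : Char) : Char :=
  if c = 'A' then 'T' else if c = 'C' then 'G' else if c = 'G' then 'C' else if c = 'T' then 'A'
  else if c = 'a' then 't' else if c = 'c' then 'g' else if c = 'g' then 'c' else if c = 't' then 'a'
  else c

-- reverse_complement: translate then [::-1]
def reverse_complement (seq : List Char) : List Char :=
  (seq.map rcChar).reverse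

def extract_cds_from_genome (genomic_seq : String) (intervals : List (Int × Int)) (strand : String) : String :=
  let sorted_ivs := PySem.List.sorted intervals (fun x => x.1) false
  let spliced := sorted_ivs.foldl
    (fun acc p => acc ++ [PySem.Chars.upper (PySem.List.slice genomic_seq.toList (some (p.1 - 1)) (some p.2))]) []
  let cds := PySem.Chars.join [] spliced
  let cds := if strand = "-" then reverse_complement cds else cds
  String.ofList cds

-- ===== PORT B =====
def extract_cds_from_genome_alt (genomic_seq : String) (intervals : List (Int × Int)) (strand : String) : String :=
  let sorted_ivs := PySem.List.sorted intervals (fun x => x.1) false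
  let pieces :=
    if strand = "-" then
      sorted_ivs.reverse.map
        (fun p => reverse_complement (PySem.Chars.upper (PySem.List.slice genomic_seq.toList (some (p.1 - 1)) (some p.2))))
    else
      sorted_ivs.map
        (fun p => PySem.Chars.upper (PySem.List.slice genomic_seq.toList (some (p.1 - 1)) (some p.2)))
  String.ofList (PySem.Chars.join [] pieces)

-- ===== PRECONDITION & SPEC =====
def Spec_extract_cds_from_genome (genomic_seq : String) (intervals : List (Int × Int)) (strand : String) (out : String) : Prop := out = extract_cds_from_genome_alt genomic_seq intervals strand
instance (genomic_seq : String) (intervals : List (Int × Int)) (strand : String) (out : String) : Decidable (Spec_extract_cds_from_genome genomic_seq intervals strand out) := by unfold Spec_extract_cds_from_genome; infer_instance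

-- ===== CLAIM (what is proved, stated in full; the proofs are below) =====
def Claim_equal_extract_cds_from_genome : Prop := ∀ (genomic_seq : String) (intervals : List (Int × Int)) (strand : String), Dom_extract_cds_from_genome genomic_seq intervals strand → Spec_extract_cds_from_genome genomic_seq intervals strand (extract_cds_from_genome genomic_seq intervals strand)

-- ===== LEMMAS AND PROOFS =====

-- ''.join is flatten
theorem join_nil_sep (l : List (List Char)) : PySem.Chars.join [] l = l.flatten := by
  induction l with
  | nil => simp [PySem.Chars.join, List.intercalate]
  | cons a t ih =>
    cases t with
    | nil => simp [PySem.Chars.join, List.intercalate]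
    | cons b t' =>
      simp only [PySem.Chars.join, List.intercalate, List.intersperse] at ih ⊢
      simp [ih]

-- RC of a concatenation of pieces = concatenation of the per-piece RCs in reverse order
theorem rc_flatten (l : List (List Char)) :
    reverse_complement l.flatten = ((l.map reverse_complement).reverse).flatten := by
  simp [reverse_complement, List.map_flatten, List.reverse_flatten, List.map_map]
  rfl

-- ===== VERDICT (by name: the statement is the Claim_ definition above) =====
theorem extract_cds_from_genome_spec : Claim_equal_extract_cds_from_genome := by
  unfold Claim_equal_extract_cds_from_genome
  intro g ivs strand _
  unfold Spec_extract_cds_from_genome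
  by_cases h : strand = "-"
  · simp only [extract_cds_from_genome, extract_cds_from_genome_alt, if_pos h,
      PySem.List.foldl_append_singleton_eq_map, join_nil_sep, rc_flatten,
      List.map_reverse, List.nil_append, List.map_map]
    congr 1
  · simp only [extract_cds_from_genome, extract_cds_from_genome_alt, if_neg h,
      PySem.List.foldl_append_singleton_eq_map, List.nil_append]
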